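-- pv_equiv track=rewrite | github.com/google-research/google-research | protenn/per_residue_sparse.py | normalize_ijv_tuples
-- ===== SOURCE A (Python) =====
-- def normalize_ijv_tuples(
--     ijv_list,
--     vocab,
--     applicable_label_dict,
--     label_to_idx = None,
-- ):
--   """Gives, for example, clan labels for each family label.
--
--   For each ijv, if there is an associated label that is implied by that label,
--   then also return that ijv. If a clan label is implied by
--   more than one other label, ties are broken by taking the max.
--
--   Args:
--     ijv_list: see COO_ijv_list above.
--     vocab: 1d array of string values corresponding to label indexes.
--     applicable_label_dict: Mapping from labels to their parents (including
--       indirect parents). E.g. utils.family_to_clan_mapping. Note that this is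
--       different from proteinfer-style applicable label dicts, where more than
--       one label may be implied.
--     label_to_idx: optional inverted lookup of vocab. Often, this function is
--       called many times, and inverting the vocabulary for each call can cause
--       performance problems. In this case, one can provide a precomputed lookup.
--       If not provided, vocab will be manually inverted.
--
--   Returns:
--     ijv list as described above.
--   """
--   if label_to_idx is None:
--     label_to_idx = {v: i for i, v in enumerate(vocab)}
--
--   seq_and_label_to_v = {}
--
--   for ijv in ijv_list:
--     seq_idx, label_idx, activation_confidence = ijv
--
--     value_key = (seq_idx, label_idx)
--     if value_key not in seq_and_label_to_v:
--       seq_and_label_to_v[value_key] = activation_confidence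
--     elif seq_and_label_to_v[value_key] < activation_confidence:
--       seq_and_label_to_v[value_key] = activation_confidence
--
--     label = vocab[label_idx]
--     if label in applicable_label_dict:
--       implied_label = applicable_label_dict[label]
--       implied_label_idx = label_to_idx[implied_label]
--       value_key = (seq_idx, implied_label_idx)
--       if value_key not in seq_and_label_to_v:
--         seq_and_label_to_v[value_key] = activation_confidence
--       elif seq_and_label_to_v[value_key] < activation_confidence:
--         seq_and_label_to_v[value_key] = activation_confidence
--
--   return [(i, j, v) for (i, j), v in seq_and_label_to_v.items()]
-- ===== SOURCE B (Python) =====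
-- def normalize_ijv_tuples(
--     ijv_list,
--     vocab,
--     applicable_label_dict,
--     label_to_idx = None,
-- ):
--   """Two-pass variant: expand each ijv into key/confidence records (adding the
--   implied parent label's record when there is one), then group all confidences
--   per (seq, label) key and reduce each group with a first-max fold."""
--   if label_to_idx is None:
--     label_to_idx = {v: i for i, v in enumerate(vocab)}
--
--   expanded = []
--   for seq_idx, label_idx, conf in ijv_list:
--     expanded.append(((seq_idx, label_idx), conf))
--     label = vocab[label_idx]
--     if label in applicable_label_dict:
--       implied_idx = label_to_idx[applicable_label_dict[label]]
--       expanded.append(((seq_idx, implied_idx), conf))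
--
--   groups = {}
--   for key, conf in expanded:
--     groups.setdefault(key, []).append(conf)
--
--   def first_max(confs):
--     best = confs[0]
--     for c in confs[1:]:
--       if best < c:
--         best = c
--     return best
--
--   return [(i, j, first_max(confs)) for (i, j), confs in groups.items()]
-- ===== Notes on version B (the rewrite author's own statement) =====
-- stated objective: alternative
-- what changed: A interleaves label expansion with a running per-key max in one dict-updating loop; B first flat-expands every ijv into (key, confidence) records (parent labels included), then groups all confidences per key into lists, and finally reduces each group with a first-max fold.
import Mathlib
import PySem

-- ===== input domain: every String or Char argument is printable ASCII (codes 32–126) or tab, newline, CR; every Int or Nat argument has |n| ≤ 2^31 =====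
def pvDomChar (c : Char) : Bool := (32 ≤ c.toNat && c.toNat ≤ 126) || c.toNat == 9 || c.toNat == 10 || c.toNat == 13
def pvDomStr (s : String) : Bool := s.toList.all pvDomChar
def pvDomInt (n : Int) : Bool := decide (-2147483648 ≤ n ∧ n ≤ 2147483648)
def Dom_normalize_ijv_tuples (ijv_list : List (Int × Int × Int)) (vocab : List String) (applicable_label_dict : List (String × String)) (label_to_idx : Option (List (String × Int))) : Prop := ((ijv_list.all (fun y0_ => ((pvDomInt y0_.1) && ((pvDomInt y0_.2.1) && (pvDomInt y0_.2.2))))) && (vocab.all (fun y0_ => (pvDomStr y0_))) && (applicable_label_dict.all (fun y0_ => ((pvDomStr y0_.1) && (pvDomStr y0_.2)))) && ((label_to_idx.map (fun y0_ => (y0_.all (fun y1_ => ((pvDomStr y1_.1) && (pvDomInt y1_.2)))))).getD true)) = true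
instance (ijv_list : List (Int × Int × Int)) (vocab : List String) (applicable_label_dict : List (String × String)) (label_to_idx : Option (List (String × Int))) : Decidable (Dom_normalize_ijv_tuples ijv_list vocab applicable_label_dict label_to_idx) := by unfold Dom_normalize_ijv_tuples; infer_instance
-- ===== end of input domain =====

-- B replaces A's single loop (running per-key max interleaved with parent-label expansion) by
-- expand-then-group-then-reduce: a flat record list, a dict of per-key confidence lists, and a
-- first-max fold per group; same return value (alternative decomposition, no speed claim).

-- shared helper: the effective label_to_idx ({v: i for i, v in enumerate(vocab)} when None),
-- the same line in both Pythons
def pvLtx (label_to_idx : Option (List (String × Int))) (vocab : List String) : PySem.Dict String Int :=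
  match label_to_idx with
  | none => (PySem.List.enumerate vocab).foldl (fun d p => d.insert p.2 p.1) PySem.Dict.empty
  | some m => PySem.Dict.ofList m

-- ===== PORT A =====
-- the repeated "if key not in d: d[key]=v elif d[key] < v: d[key]=v" block
def pvUpd (d : PySem.Dict (Int × Int) Int) (key : Int × Int) (conf : Int) : PySem.Dict (Int × Int) Int :=
  match d.get? key with
  | none => d.insert key conf
  | some old => if old < conf then d.insert key conf else d

def pvBodyA (vocab : List String) (ald : PySem.Dict String String) (ltx : PySem.Dict String Int)
    (d : PySem.Dict (Int × Int) Int) (x : Int × Int × Int) : PySem.Dict (Int × Int) Int :=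
  let d1 := pvUpd d (x.1, x.2.1) x.2.2
  match PySem.List.pyGet? vocab x.2.1 with
  | none => d1        -- Python raises IndexError here; excluded by Pre_
  | some label =>
    match ald.get? label with
    | none => d1
    | some implied =>
      match ltx.get? implied with
      | none => d1    -- Python raises KeyError here; excluded by Pre_
      | some j2 => pvUpd d1 (x.1, j2) x.2.2

def normalize_ijv_tuples (ijv_list : List (Int × Int × Int)) (vocab : List String) (applicable_label_dict : List (String × String)) (label_to_idx : Option (List (String × Int))) : List (Int × Int × Int) :=
  let ltx := pvLtx label_to_idx vocab
  let d := ijv_list.foldl (pvBodyA vocab (PySem.Dict.ofList applicable_label_dict) ltx) PySem.Dict.empty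
  d.items.map (fun p => (p.1.1, p.1.2, p.2))

-- ===== PORT B =====
-- pass 1 helper: the records one ijv contributes (itself, plus the implied parent label if any)
def pvExpandOne (vocab : List String) (ald : PySem.Dict String String) (ltx : PySem.Dict String Int)
    (x : Int × Int × Int) : List ((Int × Int) × Int) :=
  ((x.1, x.2.1), x.2.2) ::
    (match PySem.List.pyGet? vocab x.2.1 with
     | none => []     -- Python raises IndexError here; excluded by Pre_
     | some label =>
       match ald.get? label with
       | none => []
       | some implied =>
         match ltx.get? implied with
         | none => []  -- Python raises KeyError here; excluded by Pre_
         | some j2 => [((x.1, j2), x.2.2)])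

-- first_max: confs[0], then keep the strictly larger
def pvFirstMax (confs : List Int) : Int :=
  match confs with
  | [] => 0  -- unreachable: groups are only ever appended to, never empty
  | best :: rest => rest.foldl (fun best c => if best < c then c else best) best

def normalize_ijv_tuples_alt (ijv_list : List (Int × Int × Int)) (vocab : List String) (applicable_label_dict : List (String × String)) (label_to_idx : Option (List (String × Int))) : List (Int × Int × Int) :=
  let ltx := pvLtx label_to_idx vocab
  let expanded := ijv_list.foldl
    (fun acc x => acc ++ pvExpandOne vocab (PySem.Dict.ofList applicable_label_dict) ltx x) []
  let groups := expanded.foldl (fun g p => g.modify p.1 [] (· ++ [p.2])) PySem.Dict.empty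
  groups.items.map (fun q => (q.1.1, q.1.2, pvFirstMax q.2))

-- ===== PRECONDITION & SPEC =====
-- Pre_ excludes exactly the inputs where Python A raises: a label index out of range for vocab
-- (IndexError) or an implied label missing from the effective label_to_idx (KeyError).
def pvPreOk (vocab : List String) (ald : PySem.Dict String String) (ltx : PySem.Dict String Int)
    (x : Int × Int × Int) : Bool :=
  match PySem.List.pyGet? vocab x.2.1 with
  | none => false
  | some label =>
    match ald.get? label with
    | none => true
    | some implied => (ltx.get? implied).isSome

def Pre_normalize_ijv_tuples (ijv_list : List (Int × Int × Int)) (vocab : List String) (applicable_label_dict : List (String × String)) (label_to_idx : Option (List (String × Int))) : Prop :=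
  ijv_list.all (pvPreOk vocab (PySem.Dict.ofList applicable_label_dict) (pvLtx label_to_idx vocab)) = true

instance (ijv_list : List (Int × Int × Int)) (vocab : List String) (applicable_label_dict : List (String × String)) (label_to_idx : Option (List (String × Int))) : Decidable (Pre_normalize_ijv_tuples ijv_list vocab applicable_label_dict label_to_idx) := by unfold Pre_normalize_ijv_tuples; infer_instance

def pvWitness_normalize_ijv_tuples : (List (Int × Int × Int)) × List String × (List (String × String)) × (Option (List (String × Int))) :=
  ([(0, 0, 5), (1, 0, 3), (0, 1, 7), (0, 1, 2)], ["fam", "clan"], [("fam", "clan")], none)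

def Spec_normalize_ijv_tuples (ijv_list : List (Int × Int × Int)) (vocab : List String) (applicable_label_dict : List (String × String)) (label_to_idx : Option (List (String × Int))) (out : List (Int × Int × Int)) : Prop := out = normalize_ijv_tuples_alt ijv_list vocab applicable_label_dict label_to_idx
instance (ijv_list : List (Int × Int × Int)) (vocab : List String) (applicable_label_dict : List (String × String)) (label_to_idx : Option (List (String × Int))) (out : List (Int × Int × Int)) : Decidable (Spec_normalize_ijv_tuples ijv_list vocab applicable_label_dict label_to_idx out) := by unfold Spec_normalize_ijv_tuples; infer_instance

-- ===== CLAIM (what is proved, stated in full; the proofs are below) =====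
def Claim_equal_normalize_ijv_tuples : Prop := ∀ (ijv_list : List (Int × Int × Int)) (vocab : List String) (applicable_label_dict : List (String × String)) (label_to_idx : Option (List (String × Int))), Dom_normalize_ijv_tuples ijv_list vocab applicable_label_dict label_to_idx → Pre_normalize_ijv_tuples ijv_list vocab applicable_label_dict label_to_idx → Spec_normalize_ijv_tuples ijv_list vocab applicable_label_dict label_to_idx (normalize_ijv_tuples ijv_list vocab applicable_label_dict label_to_idx)

-- ===== LEMMAS AND PROOFS =====

-- A's update as an unconditional insert of the combined value
def pvComb (a : Option Int) (c : Int) : Int :=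
  match a with
  | none => c
  | some b => if b < c then c else b

def pvStep (d : PySem.Dict (Int × Int) Int) (p : (Int × Int) × Int) : PySem.Dict (Int × Int) Int :=
  d.insert p.1 (pvComb (d.get? p.1) p.2)

lemma insert_get_self (d : PySem.Dict (Int × Int) Int) (k : Int × Int) (o : Int)
    (hn : d.keys.Nodup) (ho : d.get? k = some o) : d.insert k o = d := by
  apply PySem.Dict.ext
  have hc : d.contains k = true := by rw [PySem.Dict.contains_eq_isSome_get?, ho]; rfl
  rw [PySem.Dict.items_insert_of_contains (h := hc)]
  conv_rhs => rw [← List.map_id d.items]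
  apply List.map_congr_left
  rintro ⟨a, b⟩ hp
  have hg := PySem.Dict.get?_of_mem_items d hp hn
  by_cases h : a = k
  · subst h
    rw [ho] at hg
    simp_all
  · simp [h]

lemma pvUpd_eq_pvStep (d : PySem.Dict (Int × Int) Int) (k : Int × Int) (c : Int)
    (hn : d.keys.Nodup) : pvUpd d k c = pvStep d (k, c) := by
  unfold pvUpd pvStep pvComb
  cases ho : d.get? k with
  | none => rfl
  | some old =>
    by_cases hlt : old < c
    · simp [hlt]
    · simp only [if_neg hlt]
      exact (insert_get_self d k old hn ho).symm

lemma nodup_keys_pvStep (d : PySem.Dict (Int × Int) Int) (p : (Int × Int) × Int)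
    (hn : d.keys.Nodup) : (pvStep d p).keys.Nodup := by
  exact PySem.Dict.nodup_keys_insert _ _ _ hn

lemma nodup_keys_foldl_pvStep (l : List ((Int × Int) × Int)) (d : PySem.Dict (Int × Int) Int)
    (hn : d.keys.Nodup) : (l.foldl pvStep d).keys.Nodup := by
  induction l generalizing d with
  | nil => exact hn
  | cons p t ih => exact ih (pvStep d p) (nodup_keys_pvStep d p hn)

lemma pvBodyA_eq_foldl (vocab : List String) (ald : PySem.Dict String String)
    (ltx : PySem.Dict String Int) (d : PySem.Dict (Int × Int) Int) (x : Int × Int × Int)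
    (hn : d.keys.Nodup) :
    pvBodyA vocab ald ltx d x = (pvExpandOne vocab ald ltx x).foldl pvStep d := by
  unfold pvBodyA pvExpandOne
  rw [pvUpd_eq_pvStep d _ _ hn]
  have hn1 : (pvStep d ((x.1, x.2.1), x.2.2)).keys.Nodup := nodup_keys_pvStep d _ hn
  simp only [List.foldl_cons]
  cases h1 : PySem.List.pyGet? vocab x.2.1 with
  | none => simp
  | some label =>
    cases h2 : ald.get? label with
    | none => simp [h2]
    | some implied =>
      simp only [h2]
      cases h3 : ltx.get? implied with
      | none => simp
      | some j2 =>
        simp only [List.foldl_cons, List.foldl_nil]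
        exact pvUpd_eq_pvStep _ _ _ hn1

lemma foldl_bodyA_eq (vocab : List String) (ald : PySem.Dict String String)
    (ltx : PySem.Dict String Int) (l : List (Int × Int × Int)) (d : PySem.Dict (Int × Int) Int)
    (hn : d.keys.Nodup) :
    l.foldl (pvBodyA vocab ald ltx) d = (l.flatMap (pvExpandOne vocab ald ltx)).foldl pvStep d := by
  induction l generalizing d with
  | nil => rfl
  | cons x t ih =>
    rw [List.flatMap_cons, List.foldl_append, List.foldl_cons,
      pvBodyA_eq_foldl vocab ald ltx d x hn]
    exact ih _ (nodup_keys_foldl_pvStep _ d hn)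

def pvRed (o : Option Int) (vs : List Int) : Option Int :=
  vs.foldl (fun a c => some (pvComb a c)) o

lemma get?_foldl_pvStep (l : List ((Int × Int) × Int)) (d : PySem.Dict (Int × Int) Int)
    (k : Int × Int) :
    (l.foldl pvStep d).get? k = pvRed (d.get? k) ((l.filter (fun p => p.1 == k)).map (·.2)) := by
  induction l generalizing d with
  | nil => rfl
  | cons p t ih =>
    rw [List.foldl_cons, ih (pvStep d p)]
    by_cases h : p.1 = k
    · simp only [pvStep, PySem.Dict.get?_insert, h, List.filter_cons,
        beq_self_eq_true, if_pos, List.map_cons]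
      rfl
    · have hb : (p.1 == k) = false := by simp [h]
      have hg : (pvStep d p).get? k = d.get? k := by
        unfold pvStep
        rw [PySem.Dict.get?_insert, if_neg (fun hk => h hk.symm)]
      rw [hg, List.filter_cons, hb]
      simp

lemma pvRed_some (b : Int) (t : List Int) :
    pvRed (some b) t = some (t.foldl (fun best c => if best < c then c else best) b) := by
  induction t generalizing b with
  | nil => rfl
  | cons c t ih =>
    rw [List.foldl_cons]
    exact ih (if b < c then c else b)

lemma pvRed_none_ne_nil (vs : List Int) (h : vs ≠ []) :
    pvRed none vs = some (pvFirstMax vs) := by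
  cases vs with
  | nil => exact absurd rfl h
  | cons b t =>
    show pvRed (some (pvComb none b)) t = _
    exact pvRed_some b t

lemma items_eq_map_keys {ν : Type} (d : PySem.Dict (Int × Int) ν) (d0 : ν)
    (h : d.keys.Nodup) : d.items = d.keys.map (fun k => (k, d.getD k d0)) := by
  rw [show d.keys = d.items.map (·.1) from rfl, List.map_map]
  conv_lhs => rw [← List.map_id d.items]
  apply List.map_congr_left
  rintro ⟨a, b⟩ hp
  simp [PySem.Dict.getD_of_mem_items d hp h]

-- ===== VERDICT (by name: the statement is the Claim_ definition above) =====
theorem normalize_ijv_tuples_spec : Claim_equal_normalize_ijv_tuples := by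
  intro ijv_list vocab applicable_label_dict label_to_idx _dom _pre
  unfold Spec_normalize_ijv_tuples normalize_ijv_tuples normalize_ijv_tuples_alt
  dsimp only
  rw [PySem.List.foldl_append_eq_flatMap, List.nil_append,
    foldl_bodyA_eq _ _ _ _ _ PySem.Dict.nodup_keys_empty]
  have hnA := nodup_keys_foldl_pvStep
    (ijv_list.flatMap (pvExpandOne vocab (PySem.Dict.ofList applicable_label_dict)
      (pvLtx label_to_idx vocab))) PySem.Dict.empty PySem.Dict.nodup_keys_empty
  have hnG := PySem.Dict.nodup_keys_foldl_modify_key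
    (ijv_list.flatMap (pvExpandOne vocab (PySem.Dict.ofList applicable_label_dict)
      (pvLtx label_to_idx vocab))) (fun p => p.1) [] (fun _ p => (· ++ [p.2]))
    PySem.Dict.empty PySem.Dict.nodup_keys_empty
  rw [items_eq_map_keys _ (0 : Int) hnA, items_eq_map_keys _ ([] : List Int) hnG,
    List.map_map, List.map_map]
  have hkA := PySem.Dict.keys_foldl_insert_key
    (ijv_list.flatMap (pvExpandOne vocab (PySem.Dict.ofList applicable_label_dict)
      (pvLtx label_to_idx vocab))) (fun p => p.1)
    (fun d p => pvComb (d.get? p.1) p.2) PySem.Dict.empty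
  have hkG := PySem.Dict.keys_foldl_modify_key
    (ijv_list.flatMap (pvExpandOne vocab (PySem.Dict.ofList applicable_label_dict)
      (pvLtx label_to_idx vocab))) (fun p => p.1) [] (fun _ p => (· ++ [p.2]))
    PySem.Dict.empty
  rw [show (List.foldl pvStep PySem.Dict.empty
      (ijv_list.flatMap (pvExpandOne vocab (PySem.Dict.ofList applicable_label_dict)
        (pvLtx label_to_idx vocab)))).keys =
      (List.foldl (fun d p => d.modify p.1 [] (· ++ [p.2])) PySem.Dict.empty
        (ijv_list.flatMap (pvExpandOne vocab (PySem.Dict.ofList applicable_label_dict)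
          (pvLtx label_to_idx vocab)))).keys from hkA.trans hkG.symm]
  apply List.map_congr_left
  intro k hk
  -- k is a key of the groups dict, hence occurs among the expanded records' keys
  have hmem : k ∈ (ijv_list.flatMap (pvExpandOne vocab (PySem.Dict.ofList applicable_label_dict)
      (pvLtx label_to_idx vocab))).map (fun p => p.1) := by
    rw [hkG] at hk
    simpa using (PySem.Set.mem_ofList _ _).mp hk
  set E := ijv_list.flatMap (pvExpandOne vocab (PySem.Dict.ofList applicable_label_dict)
    (pvLtx label_to_idx vocab)) with hEdef
  have hvals : (List.foldl (fun g p => g.modify p.1 [] (· ++ [p.2])) PySem.Dict.empty E).getD k []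
      = (E.filter (fun p => p.1 == k)).map (·.2) := by
    rw [PySem.Dict.getD_foldl_modify_append, PySem.Dict.getD_empty, List.nil_append]
  have hne : (E.filter (fun p => p.1 == k)).map (·.2) ≠ [] := by
    obtain ⟨p, hp, hp1⟩ := List.mem_map.mp hmem
    intro hnil
    have hf : E.filter (fun p => p.1 == k) = [] := List.map_eq_nil_iff.mp hnil
    have := List.filter_eq_nil_iff.mp hf p hp
    simp [hp1] at this
  have hgetA : (List.foldl pvStep PySem.Dict.empty E).getD k 0
      = pvFirstMax ((E.filter (fun p => p.1 == k)).map (·.2)) := by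
    rw [PySem.Dict.getD_eq_get?_getD, get?_foldl_pvStep, PySem.Dict.get?_empty,
      pvRed_none_ne_nil _ hne]
    rfl
  simp only [Function.comp]
  rw [hgetA, hvals]
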